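-- pv_equiv track=rewrite | github.com/RodAli/Particle-Ecosystem | util.py | find_furthest_coords_to_target_coord
-- ===== SOURCE A (Python) =====
-- def get_manhattan_distance(coord1, coord2):
--     return abs(coord1[0] - coord2[0]) + abs(coord1[1] - coord2[1])
--
-- def find_furthest_coords_to_target_coord(targetCoord: tuple, coords: list):
--     manhattan_distances = [get_manhattan_distance(targetCoord, c) for c in coords]
--
--     closest_distance = max(manhattan_distances)
--
--     indexes = []
--     for i in range(len(manhattan_distances)):
--         if closest_distance == manhattan_distances[i]:
--             indexes.append(i)
--
--     closest_coords = []
--     for idx in indexes: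
--         closest_coords.append(coords[idx])
--
--     return closest_coords
-- ===== SOURCE B (Python) =====
-- def find_furthest_coords_to_target_coord(targetCoord: tuple, coords: list):
--     best = None
--     result = []
--     for c in coords:
--         d = abs(targetCoord[0] - c[0]) + abs(targetCoord[1] - c[1])
--         if best is None or d > best:
--             best = d
--             result = [c]
--         elif d == best:
--             result.append(c)
--     return result
-- ===== Notes on version B (the rewrite author's own statement) =====
-- stated objective: alternative
-- what changed: Replaced A's multi-pass scheme (build a distance list, take its max, collect matching indexes, gather coords by index) with a single left-to-right pass maintaining the best distance and the running result list.
import Mathlib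
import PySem

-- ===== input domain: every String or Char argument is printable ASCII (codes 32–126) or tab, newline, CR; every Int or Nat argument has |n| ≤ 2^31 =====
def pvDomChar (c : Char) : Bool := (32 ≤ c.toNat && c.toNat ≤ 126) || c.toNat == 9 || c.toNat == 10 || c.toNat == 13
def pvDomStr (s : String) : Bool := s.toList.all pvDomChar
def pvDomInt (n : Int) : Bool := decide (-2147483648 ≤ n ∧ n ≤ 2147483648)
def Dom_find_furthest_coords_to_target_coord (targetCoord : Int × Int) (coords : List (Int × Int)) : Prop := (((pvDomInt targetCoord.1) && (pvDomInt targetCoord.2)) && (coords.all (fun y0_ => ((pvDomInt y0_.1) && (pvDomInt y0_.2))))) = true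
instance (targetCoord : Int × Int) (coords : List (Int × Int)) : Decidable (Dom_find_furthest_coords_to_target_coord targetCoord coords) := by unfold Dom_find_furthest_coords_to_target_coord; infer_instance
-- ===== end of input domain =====

-- B replaces A's multi-pass scheme (distance list, max, index collection, gather) by one
-- left-to-right pass keeping the best distance and the running result list.


-- ===== PORT A =====
def get_manhattan_distance (coord1 coord2 : Int × Int) : Int :=
  |coord1.1 - coord2.1| + |coord1.2 - coord2.2|

def find_furthest_coords_to_target_coord (targetCoord : Int × Int) (coords : List (Int × Int)) : List (Int × Int) :=
  let manhattan_distances := coords.map (fun c => get_manhattan_distance targetCoord c)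
  match PySem.List.max? manhattan_distances (fun x => x) with
  | none => []  -- Python's max([]) raises ValueError here; excluded by Pre_
  | some closest_distance =>
    let indexes := (PySem.List.pyRange 0 (manhattan_distances.length : Int) 1).foldl
      (fun acc i => if closest_distance = PySem.List.pyGetD manhattan_distances i 0 then acc ++ [i] else acc) []
    indexes.foldl (fun acc idx => acc ++ [PySem.List.pyGetD coords idx ((0 : Int), (0 : Int))]) []

-- ===== PORT B =====
def pvBLoop (targetCoord : Int × Int) (best : Option Int) (result : List (Int × Int)) :
    List (Int × Int) → List (Int × Int)
  | [] => result
  | c :: rest =>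
    let d := |targetCoord.1 - c.1| + |targetCoord.2 - c.2|
    match best with
    | none => pvBLoop targetCoord (some d) [c] rest
    | some b =>
      if b < d then pvBLoop targetCoord (some d) [c] rest
      else if d = b then pvBLoop targetCoord (some b) (result ++ [c]) rest
      else pvBLoop targetCoord (some b) result rest

def find_furthest_coords_to_target_coord_alt (targetCoord : Int × Int) (coords : List (Int × Int)) : List (Int × Int) :=
  pvBLoop targetCoord none [] coords

-- ===== PRECONDITION & SPEC =====
-- Pre_ excludes only the empty coords list, on which Python's max([]) raises ValueError.
def Pre_find_furthest_coords_to_target_coord (targetCoord : Int × Int) (coords : List (Int × Int)) : Prop := coords ≠ []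
instance (targetCoord : Int × Int) (coords : List (Int × Int)) : Decidable (Pre_find_furthest_coords_to_target_coord targetCoord coords) := by unfold Pre_find_furthest_coords_to_target_coord; infer_instance
def pvWitness_find_furthest_coords_to_target_coord : (Int × Int) × (List (Int × Int)) := ((0, 0), [(1, 2), (3, -1)])

def Spec_find_furthest_coords_to_target_coord (targetCoord : Int × Int) (coords : List (Int × Int)) (out : List (Int × Int)) : Prop := out = find_furthest_coords_to_target_coord_alt targetCoord coords
instance (targetCoord : Int × Int) (coords : List (Int × Int)) (out : List (Int × Int)) : Decidable (Spec_find_furthest_coords_to_target_coord targetCoord coords out) := by unfold Spec_find_furthest_coords_to_target_coord; infer_instance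

-- ===== CLAIM (what is proved, stated in full; the proofs are below) =====
def Claim_equal_find_furthest_coords_to_target_coord : Prop := ∀ (targetCoord : Int × Int) (coords : List (Int × Int)), Dom_find_furthest_coords_to_target_coord targetCoord coords → Pre_find_furthest_coords_to_target_coord targetCoord coords → Spec_find_furthest_coords_to_target_coord targetCoord coords (find_furthest_coords_to_target_coord targetCoord coords)
-- ===== LEMMAS AND PROOFS =====
theorem pvGetD_append_left (xs : List (Int × Int)) (ys : List (Int × Int)) (i : Int)
    (h0 : 0 ≤ i) (h1 : i < (xs.length : Int)) (d : Int × Int) :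
    PySem.List.pyGetD (xs ++ ys) i d = PySem.List.pyGetD xs i d := by
  obtain ⟨n, rfl⟩ := Int.eq_ofNat_of_zero_le h0
  have hn : n < xs.length := by exact_mod_cast h1
  simp [PySem.List.pyGetD_natCast, List.getElem?_append_left hn]

theorem pvGetDI_append_left (xs ys : List Int) (i : Int)
    (h0 : 0 ≤ i) (h1 : i < (xs.length : Int)) (d : Int) :
    PySem.List.pyGetD (xs ++ ys) i d = PySem.List.pyGetD xs i d := by
  obtain ⟨n, rfl⟩ := Int.eq_ofNat_of_zero_le h0
  have hn : n < xs.length := by exact_mod_cast h1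
  simp [PySem.List.pyGetD_natCast, List.getElem?_append_left hn]

theorem pvCore (g : (Int × Int) → Int) (M : Int) (coords : List (Int × Int)) :
    ((PySem.List.pyRange 0 (coords.length : Int) 1).filter
        (fun i => decide (M = PySem.List.pyGetD (coords.map g) i 0))).map
      (fun i => PySem.List.pyGetD coords i ((0 : Int), (0 : Int)))
    = coords.filter (fun c => decide (M = g c)) := by
  induction coords using List.reverseRecOn with
  | nil => simp [PySem.List.pyRange_one_eq_nil]
  | append_singleton xs x ih =>
    have hlen : (((xs ++ [x]).length : Nat) : Int) = (xs.length : Int) + 1 := by simp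
    rw [hlen, PySem.List.pyRange_one_succ_right (by positivity), List.filter_append, List.map_append]
    have hfc : (PySem.List.pyRange 0 (xs.length : Int) 1).filter
        (fun i => decide (M = PySem.List.pyGetD ((xs ++ [x]).map g) i 0))
        = (PySem.List.pyRange 0 (xs.length : Int) 1).filter
        (fun i => decide (M = PySem.List.pyGetD (xs.map g) i 0)) := by
      apply List.filter_congr
      intro i hi
      rw [PySem.List.mem_pyRange_one] at hi
      rw [List.map_append, pvGetDI_append_left _ _ _ hi.1 (by simpa using hi.2)]
    rw [hfc]
    have hmc : ((PySem.List.pyRange 0 (xs.length : Int) 1).filter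
          (fun i => decide (M = PySem.List.pyGetD (xs.map g) i 0))).map
        (fun i => PySem.List.pyGetD (xs ++ [x]) i ((0 : Int), (0 : Int)))
        = ((PySem.List.pyRange 0 (xs.length : Int) 1).filter
          (fun i => decide (M = PySem.List.pyGetD (xs.map g) i 0))).map
        (fun i => PySem.List.pyGetD xs i ((0 : Int), (0 : Int))) := by
      apply List.map_congr_left
      intro i hi
      have hi' := List.mem_of_mem_filter hi
      rw [PySem.List.mem_pyRange_one] at hi'
      exact pvGetD_append_left _ _ _ hi'.1 hi'.2 _
    rw [hmc, ih, List.filter_append]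
    congr 1
    have h1 : PySem.List.pyGetD ((xs ++ [x]).map g) (xs.length : Int) 0 = g x := by
      simp [PySem.List.pyGetD_natCast, List.getD]
    have h2 : PySem.List.pyGetD (xs ++ [x]) (xs.length : Int) ((0 : Int), (0 : Int)) = x := by
      simp [PySem.List.pyGetD_natCast, List.getD]
    by_cases h : M = g x
    · simp [h2, h]
    · simp [h1, h]

-- A's index-collect-then-gather passes compute exactly the filter by "distance equals M".
theorem pvA_gather (t : Int × Int) (M : Int) (coords : List (Int × Int)) :
    (((PySem.List.pyRange 0 ((coords.map (fun c => get_manhattan_distance t c)).length : Int) 1).foldl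
        (fun acc i => if M = PySem.List.pyGetD (coords.map (fun c => get_manhattan_distance t c)) i 0 then acc ++ [i] else acc) []).foldl
      (fun acc idx => acc ++ [PySem.List.pyGetD coords idx ((0 : Int), (0 : Int))]) [])
    = coords.filter (fun c => decide (M = get_manhattan_distance t c)) := by
  rw [PySem.List.foldl_append_ite (p := fun i => M = PySem.List.pyGetD (coords.map (fun c => get_manhattan_distance t c)) i 0) (f := fun i => i)]
  rw [PySem.List.foldl_append_singleton_eq_map]
  simp only [List.nil_append, List.map_map, List.length_map]
  exact pvCore (fun c => get_manhattan_distance t c) M coords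

-- B's loop with a running best b computes the suffix filter, prefixed by the old result iff b stays maximal.
theorem pvB_loop_spec (t : Int × Int) (l : List (Int × Int)) : ∀ (b : Int) (res : List (Int × Int)),
    pvBLoop t (some b) res l =
      (if l.foldl (fun a c => max a (get_manhattan_distance t c)) b = b then res else []) ++
        l.filter (fun c => decide (get_manhattan_distance t c = l.foldl (fun a c => max a (get_manhattan_distance t c)) b)) := by
  induction l with
  | nil => intro b res; simp [pvBLoop]
  | cons c rest ih =>
    intro b res
    have hd : |t.1 - c.1| + |t.2 - c.2| = get_manhattan_distance t c := rfl
    by_cases h1 : b < get_manhattan_distance t c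
    · have hm : max b (get_manhattan_distance t c) = get_manhattan_distance t c := max_eq_right (le_of_lt h1)
      have hM := (PySem.List.le_foldl_max_int rest (fun c => get_manhattan_distance t c) (get_manhattan_distance t c)).1
      simp only [pvBLoop, hd, if_pos h1, List.foldl_cons, hm, List.filter_cons]
      rw [ih]
      have hne : rest.foldl (fun a c => max a (get_manhattan_distance t c)) (get_manhattan_distance t c) ≠ b := by omega
      simp only [if_neg hne]
      by_cases h2 : rest.foldl (fun a c => max a (get_manhattan_distance t c)) (get_manhattan_distance t c) = get_manhattan_distance t c
      · simp [h2]
      · simp [h2, Ne.symm h2]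
    · by_cases h2 : get_manhattan_distance t c = b
      · have hm : max b (get_manhattan_distance t c) = b := by omega
        simp only [pvBLoop, hd, if_neg h1, if_pos h2, List.foldl_cons, hm, List.filter_cons]
        rw [ih]
        by_cases h3 : rest.foldl (fun a c => max a (get_manhattan_distance t c)) b = b
        · simp [h3, h2]
        · simp [h3, h2]; exact fun h => h3 h.symm
      · have hm : max b (get_manhattan_distance t c) = b := by
          have := lt_of_le_of_ne (not_lt.mp h1) h2; omega
        have hlt : get_manhattan_distance t c < b := lt_of_le_of_ne (not_lt.mp h1) h2
        have hM := (PySem.List.le_foldl_max_int rest (fun c => get_manhattan_distance t c) b).1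
        simp only [pvBLoop, hd, if_neg h1, if_neg h2, List.foldl_cons, hm, List.filter_cons]
        rw [ih]
        have : get_manhattan_distance t c ≠ rest.foldl (fun a c => max a (get_manhattan_distance t c)) b := by omega
        simp [this]

-- ===== VERDICT (by name: the statement is the Claim_ definition above) =====
theorem find_furthest_coords_to_target_coord_spec : Claim_equal_find_furthest_coords_to_target_coord := by
  intro t coords _ hpre
  unfold Spec_find_furthest_coords_to_target_coord
  obtain ⟨c0, rest, rfl⟩ : ∃ c0 rest, coords = c0 :: rest := by
    cases coords with
    | nil => exact absurd rfl hpre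
    | cons a l => exact ⟨a, l, rfl⟩
  have hmax : PySem.List.max? ((c0 :: rest).map (fun c => get_manhattan_distance t c)) (fun x => x)
      = some ((rest.map (fun c => get_manhattan_distance t c)).foldl max (get_manhattan_distance t c0)) := by
    rw [List.map_cons, PySem.List.max?_id_cons]
  simp only [find_furthest_coords_to_target_coord, find_furthest_coords_to_target_coord_alt, hmax]
  rw [pvA_gather t _ (c0 :: rest)]
  show _ = pvBLoop t none [] (c0 :: rest)
  simp only [pvBLoop]
  rw [pvB_loop_spec]
  have hfold : (rest.map fun c => get_manhattan_distance t c).foldl max (get_manhattan_distance t c0)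
      = rest.foldl (fun a c => max a (get_manhattan_distance t c)) (get_manhattan_distance t c0) := by
    rw [List.foldl_map]
  set M := rest.foldl (fun a c => max a (get_manhattan_distance t c)) (get_manhattan_distance t c0) with hM
  have hle : get_manhattan_distance t c0 ≤ M :=
    (PySem.List.le_foldl_max_int rest (fun c => get_manhattan_distance t c) (get_manhattan_distance t c0)).1
  rw [hfold, List.filter_cons]
  simp only [show |t.1 - c0.1| + |t.2 - c0.2| = get_manhattan_distance t c0 from rfl, ← hM]
  by_cases h : M = get_manhattan_distance t c0
  · simp only [h.symm, decide_true, if_true, List.singleton_append, List.cons.injEq, true_and]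
    apply List.filter_congr
    intro c _
    simp [eq_comm]
  · rw [if_neg (by simpa using h), if_neg h, List.nil_append]
    apply List.filter_congr
    intro c _
    simp [eq_comm]
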